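-- pv_equiv track=rewrite | github.com/untergeek/elastic-grab-bag | es-fieldusage/src/es_fieldusage/helpers/utils.py | sum_dict_values
-- ===== SOURCE A (Python) =====
-- from collections import defaultdict
-- from itertools import chain
-- from operator import getitem, itemgetter
--
-- def sort_by_name(data):
--     """Sort dictionary by key alphabetically"""
--     return dict(sorted(data.items(), key=itemgetter(0)))
--
-- def sum_dict_values(data):
--     """Sum the values of data dict(s) into a new defaultdict"""
--     # Sets up result to have every dictionary key be an integer by default
--     result = defaultdict(int)
--     dlist = []
--     for _, value in data.items():
--         dlist.append(value)
--     for key, value in chain.from_iterable(d.items() for d in dlist):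
--         result[key] += int(value)
--     return sort_by_name(dict(result))
-- ===== SOURCE B (Python) =====
-- from operator import itemgetter
--
-- def sum_dict_values(data):
--     """Sum the values of the inner dicts key-wise; sort-first, then one linear
--     merge pass over the sorted pairs (instead of hashmap accumulation + final sort)."""
--     pairs = sorted(
--         ((key, int(value)) for inner in data.values() for key, value in inner.items()),
--         key=itemgetter(0),
--     )
--     out = {}
--     if not pairs:
--         return out
--     (cur, total), rest = pairs[0], pairs[1:]
--     for key, value in rest:
--         if key == cur:
--             total += value
--         else:
--             out[cur] = total
--             cur, total = key, value
--     out[cur] = total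
--     return out
-- ===== Notes on version B (the rewrite author's own statement) =====
-- stated objective: alternative
-- what changed: Replaces defaultdict hash accumulation followed by a sort of the items with flatten-all-pairs, sort once by key, then a single linear merge pass over the sorted pairs that sums equal-key runs in already-sorted order.
import Mathlib
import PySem

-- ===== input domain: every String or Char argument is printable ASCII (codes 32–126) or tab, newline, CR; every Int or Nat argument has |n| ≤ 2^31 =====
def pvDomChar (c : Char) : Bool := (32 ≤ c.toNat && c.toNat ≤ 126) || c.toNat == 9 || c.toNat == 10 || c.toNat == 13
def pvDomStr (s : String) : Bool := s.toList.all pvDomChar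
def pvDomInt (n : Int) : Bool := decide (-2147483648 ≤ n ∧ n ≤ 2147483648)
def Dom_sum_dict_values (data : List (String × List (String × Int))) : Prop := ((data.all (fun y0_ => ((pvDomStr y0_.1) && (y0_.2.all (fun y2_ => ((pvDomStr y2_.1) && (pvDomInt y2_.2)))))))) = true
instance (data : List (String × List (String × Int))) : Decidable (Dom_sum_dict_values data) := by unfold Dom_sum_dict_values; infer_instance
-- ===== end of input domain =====

-- B replaces A's defaultdict accumulation + final items-sort with flatten, one sort by key,
-- then a single linear merge pass over the sorted pairs; proved to return the same value.

-- ===== PORT A =====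
-- result = defaultdict(int); dlist = [v for _, v in data.items()];
-- for key, value in chain.from_iterable(d.items() for d in dlist): result[key] += int(value);
-- return sort_by_name(dict(result))    (int(value) = value: the values are already ints here)
def sum_dict_values (data : List (String × List (String × Int))) : List (String × Int) :=
  let dlist := data.foldl (fun acc kv => acc ++ [kv.2]) []
  let result := (dlist.flatMap (fun d => d)).foldl
      (fun (r : PySem.Dict String Int) kv => r.modify kv.1 0 (fun w => w + kv.2)) PySem.Dict.empty
  PySem.List.sorted result.items (fun p => p.1)

-- ===== PORT B =====
-- the merge loop of Source B: 'for key, value in rest: if key == cur: total += value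
--   else: out[cur] = total; cur, total = key, value' and the trailing 'out[cur] = total'
def pvMerge (out : List (String × Int)) (cur : String) (total : Int) :
    List (String × Int) → List (String × Int)
  | [] => out ++ [(cur, total)]
  | (key, value) :: rest =>
    if key = cur then pvMerge out cur (total + value) rest
    else pvMerge (out ++ [(cur, total)]) key value rest

-- pairs = sorted(flattened pairs, key=itemgetter(0)); empty → {}; else start from pairs[0], scan pairs[1:]
def sum_dict_values_alt (data : List (String × List (String × Int))) : List (String × Int) :=
  let pairs := PySem.List.sorted ((data.map (fun kv => kv.2)).flatten) (fun p => p.1)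
  match pairs with
  | [] => []
  | (k, v) :: rest => pvMerge [] k v rest

-- ===== PRECONDITION & SPEC =====
def Spec_sum_dict_values (data : List (String × List (String × Int))) (out : List (String × Int)) : Prop := out = sum_dict_values_alt data
instance (data : List (String × List (String × Int))) (out : List (String × Int)) : Decidable (Spec_sum_dict_values data out) := by unfold Spec_sum_dict_values; infer_instance

-- ===== CLAIM (what is proved, stated in full; the proofs are below) =====
def Claim_equal_sum_dict_values : Prop := ∀ (data : List (String × List (String × Int))), Dom_sum_dict_values data → Spec_sum_dict_values data (sum_dict_values data)

-- ===== LEMMAS AND PROOFS =====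

-- the total carried by key k in a pair list
def pvS (ps : List (String × Int)) (k : String) : Int :=
  ((ps.filter (fun p => p.1 == k)).map (fun p => p.2)).sum

-- the common normal form both programs compute: distinct keys with their totals
def pvCanon (qs : List (String × Int)) : List (String × Int) :=
  (PySem.Set.ofList (qs.map (fun p => p.1))).map (fun k => (k, pvS qs k))

theorem pvS_cons_self (key : String) (value : Int) (ps : List (String × Int)) :
    pvS ((key, value) :: ps) key = value + pvS ps key := by simp [pvS]

theorem pvS_cons_ne (key : String) (value : Int) (ps : List (String × Int)) (k : String)
    (h : ¬ key = k) : pvS ((key, value) :: ps) k = pvS ps k := by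
  simp [pvS, h]

theorem pvS_perm (ps qs : List (String × Int)) (h : ps.Perm qs) (k : String) :
    pvS ps k = pvS qs k :=
  List.Perm.sum_eq (List.Perm.map _ (List.Perm.filter _ h))

theorem ofList_sublist {α : Type} [BEq α] [LawfulBEq α] (l : List α) :
    (PySem.Set.ofList l).Sublist l := by
  induction l with
  | nil => simp [PySem.Set.ofList]
  | cons x xs ih =>
    rw [PySem.Set.ofList_cons]
    exact List.Sublist.cons₂ x (List.Sublist.trans List.filter_sublist ih)

-- A's accumulation loop: the dict maps each key to its running total
theorem getD_accum (l : List (String × Int)) : ∀ (d : PySem.Dict String Int) (k : String),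
    (l.foldl (fun r kv => r.modify kv.1 0 (fun w => w + kv.2)) d).getD k 0 = d.getD k 0 + pvS l k := by
  induction l with
  | nil => simp [pvS]
  | cons p ps ih =>
    intro d k
    simp only [List.foldl_cons, ih, PySem.Dict.getD_modify]
    by_cases h : k = p.1
    · subst h; simp [pvS]; ring
    · rw [if_neg h]
      have : p.1 ≠ k := fun e => h e.symm
      simp [pvS, this]

-- invariant of Source B's merge loop over a (sorted) tail of the pair list
theorem pvMerge_spec (qs : List (String × Int)) : ∀ (out : List (String × Int))
    (cur : String) (total : Int), (∀ p ∈ qs, cur ≤ p.1) →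
    qs.Pairwise (fun a b => a.1 ≤ b.1) →
    pvMerge out cur total qs =
      out ++ (cur, total + pvS qs cur) ::
        (PySem.Set.discard (PySem.Set.ofList (qs.map (fun p => p.1))) cur).map
          (fun k => (k, pvS qs k)) := by
  induction qs with
  | nil => intro out cur total _ _; simp [pvMerge, pvS, PySem.Set.ofList, PySem.Set.discard]
  | cons p ps ih =>
    intro out cur total hle hpw
    obtain ⟨key, value⟩ := p
    have hpw' := (List.pairwise_cons.mp hpw).2
    have hhd := (List.pairwise_cons.mp hpw).1
    by_cases h : key = cur
    · subst h
      rw [pvMerge, if_pos rfl, ih out key (total + value) (fun p hp => hhd p hp) hpw']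
      congr 1
      rw [List.map_cons, PySem.Set.ofList_cons]
      simp only [PySem.Set.discard, List.filter_cons, beq_self_eq_true, Bool.not_true,
        List.filter_filter, Bool.and_self]
      congr 1
      · rw [pvS_cons_self]; ring_nf
      · apply List.map_congr_left
        intro k hk
        have hkne : ¬ key = k := by
          have := List.of_mem_filter hk
          simp at this
          exact fun e => this e.symm
        rw [pvS_cons_ne _ _ _ _ hkne]
    · have hcurkey : cur < key := lt_of_le_of_ne (hle (key, value) (by simp)) (fun e => h e.symm)
      have hcur_not : ∀ q ∈ ps, cur < q.1 := fun q hq => lt_of_lt_of_le hcurkey (hhd q hq)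
      rw [pvMerge, if_neg h, ih (out ++ [(cur, total)]) key value (fun q hq => hhd q hq) hpw']
      have hScur : pvS ((key, value) :: ps) cur = 0 := by
        have hnone : ∀ q ∈ (key, value) :: ps, ¬ (q.1 == cur) = true := by
          intro q hq
          rcases List.mem_cons.mp hq with hq1 | hq1
          · subst hq1; simp; exact fun e => h e
          · simp; exact fun e => absurd e (ne_of_gt (hcur_not q hq1))
        simp [pvS, List.filter_eq_nil_iff.mpr hnone]
      have hkeys : PySem.Set.discard (PySem.Set.ofList (((key, value) :: ps).map (fun p => p.1))) cur =
          key :: PySem.Set.discard (PySem.Set.ofList (ps.map (fun p => p.1))) key := by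
        rw [List.map_cons, PySem.Set.ofList_cons]
        simp only [PySem.Set.discard, List.filter_cons, List.filter_filter]
        have hkc : (!key == cur) = true := by simp [h]
        rw [if_pos hkc]
        congr 1
        apply List.filter_congr
        intro y hy
        have hymem : y ∈ ps.map (fun p => p.1) := (PySem.Set.mem_ofList _ _).mp hy
        obtain ⟨q, hq, rfl⟩ := List.mem_map.mp hymem
        have : ¬ (q.1 == cur) = true := by
          simp; exact fun e => absurd e (ne_of_gt (hcur_not q hq))
        simp at this
        simp [this]
      have htail : List.map (fun k => (k, pvS ((key, value) :: ps) k))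
          ((PySem.Set.ofList (ps.map (fun p => p.1))).discard key) =
          List.map (fun k => (k, pvS ps k))
          ((PySem.Set.ofList (ps.map (fun p => p.1))).discard key) := by
        apply List.map_congr_left
        intro k hk
        have hkne : ¬ key = k := by
          have := List.of_mem_filter hk
          simp at this
          exact fun e => this e.symm
        rw [pvS_cons_ne _ _ _ _ hkne]
      rw [hkeys, hScur, add_zero, List.map_cons, pvS_cons_self, htail]
      simp [List.append_assoc]

-- A's whole computation is the canonical key/total list of the sorted pairs
theorem A_eq_canon (ps : List (String × Int)) :
    PySem.List.sorted ((ps.foldl (fun r kv => r.modify kv.1 0 (fun w => w + kv.2))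
        (PySem.Dict.empty : PySem.Dict String Int)).items) (fun p => p.1) =
    pvCanon (PySem.List.sorted ps (fun p => p.1)) := by
  set d := ps.foldl (fun r kv => r.modify kv.1 0 (fun w => w + kv.2))
      (PySem.Dict.empty : PySem.Dict String Int) with hd
  set qs := PySem.List.sorted ps (fun p => p.1) with hqs
  have hperm : qs.Perm ps := PySem.List.sorted_perm ps (fun p => p.1) false
  have hkeys : d.keys = PySem.Set.ofList (ps.map (fun p => p.1)) := by
    rw [hd, PySem.Dict.keys_foldl_modify_key ps (fun kv => kv.1) 0 (fun _ kv => (fun w => w + kv.2))]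
    simp [PySem.Dict.keys_empty, PySem.Set.update_nil_left]
  have hnodup : d.keys.Nodup := by
    rw [hd]
    exact PySem.Dict.nodup_keys_foldl_modify_key ps (fun kv => kv.1) 0
      (fun _ kv => (fun w => w + kv.2)) _ (by simp)
  have hgetD : ∀ k, d.getD k 0 = pvS ps k := by
    intro k; rw [hd, getD_accum]; simp [PySem.Dict.getD_empty]
  have hitems : d.items = (PySem.Set.ofList (ps.map (fun p => p.1))).map (fun k => (k, pvS ps k)) := by
    rw [PySem.Dict.items_eq_map_keys d hnodup 0, hkeys]
    exact List.map_congr_left (fun k _ => by rw [hgetD])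
  have hcanon : pvCanon qs =
      (PySem.Set.ofList (qs.map (fun p => p.1))).map (fun k => (k, pvS ps k)) :=
    List.map_congr_left (fun k _ => by rw [pvS_perm qs ps hperm])
  apply PySem.List.sorted_eq_of_perm_of_pairwise_lt
  · rw [hcanon, hitems]
    apply List.Perm.map
    apply (List.perm_ext_iff_of_nodup (PySem.Set.nodup_ofList _) (PySem.Set.nodup_ofList _)).mpr
    intro a
    rw [PySem.Set.mem_ofList, PySem.Set.mem_ofList]
    exact (List.Perm.map (fun p => p.1) hperm).mem_iff
  · rw [hcanon, List.pairwise_map]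
    have hle : (qs.map (fun p => p.1)).Pairwise (· ≤ ·) := by
      rw [List.pairwise_map]
      exact PySem.List.sorted_pairwise ps (fun p => p.1)
    have hle' : (PySem.Set.ofList (qs.map (fun p => p.1))).Pairwise (· ≤ ·) :=
      List.Pairwise.sublist (ofList_sublist _) hle
    have hne : (PySem.Set.ofList (qs.map (fun p => p.1))).Pairwise (· ≠ ·) :=
      PySem.Set.nodup_ofList _
    exact (List.Pairwise.and hle' hne).imp (fun h => lt_of_le_of_ne h.1 h.2)

-- B's merge pass over the nonempty sorted pair list is the same canonical list
theorem B_cons_eq_canon (k : String) (v : Int) (rest : List (String × Int))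
    (h : ((k, v) :: rest).Pairwise (fun a b => a.1 ≤ b.1)) :
    pvMerge [] k v rest = pvCanon ((k, v) :: rest) := by
  have hhd := (List.pairwise_cons.mp h).1
  have hpw := (List.pairwise_cons.mp h).2
  rw [pvMerge_spec rest [] k v hhd hpw, pvCanon]
  rw [List.map_cons, PySem.Set.ofList_cons, List.map_cons, pvS_cons_self]
  have htail : ((PySem.Set.ofList (rest.map (fun p => p.1))).discard k).map
      (fun k' => (k', pvS ((k, v) :: rest) k')) =
      ((PySem.Set.ofList (rest.map (fun p => p.1))).discard k).map
      (fun k' => (k', pvS rest k')) := by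
    apply List.map_congr_left
    intro k' hk'
    have hkne : ¬ k = k' := by
      have := List.of_mem_filter hk'
      simp at this
      exact fun e => this e.symm
    rw [pvS_cons_ne _ _ _ _ hkne]
  rw [htail]
  simp [PySem.Set.discard]

theorem main_eq (data : List (String × List (String × Int))) :
    sum_dict_values data = sum_dict_values_alt data := by
  unfold sum_dict_values sum_dict_values_alt
  simp only [PySem.List.foldl_append_singleton_eq_map, List.nil_append, List.flatMap_id']
  set ps := (data.map (fun kv => kv.2)).flatten with hps
  rw [A_eq_canon ps]
  have hpw : (PySem.List.sorted ps (fun p => p.1)).Pairwise (fun a b => a.1 ≤ b.1) :=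
    PySem.List.sorted_pairwise ps (fun p => p.1)
  rcases hqe : PySem.List.sorted ps (fun p => p.1) with _ | ⟨⟨k, v⟩, rest⟩
  · simp [pvCanon, PySem.Set.ofList]
  · exact (B_cons_eq_canon k v rest (hqe ▸ hpw)).symm

-- ===== VERDICT (by name: the statement is the Claim_ definition above) =====
theorem sum_dict_values_spec : Claim_equal_sum_dict_values := by
  intro data _
  unfold Spec_sum_dict_values
  exact main_eq data
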